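-- pv_equiv track=rewrite | github.com/CryAndRRich/hustack | leetcode/array/3595_Once_Twice/codes/bit.py | onceTwice
-- ===== SOURCE A (Python) =====
-- from typing import List
--
-- def onceTwice(nums: List[int]) -> List[int]:
--     bits = [0] * 32
--     for num in nums:
--         x = num & 0xFFFFFFFF
--         for i in range(32):
--             bits[i] += (x >> i) & 1
--     xor_u = 0
--     for i in range(32):
--         if bits[i] % 3 != 0:
--             xor_u |= (1 << i)
--     mask = xor_u & -xor_u
--     bitsg = [0]*32
--     for num in nums:
--         x = num & 0xFFFFFFFF
--         if (x & mask) != 0: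
--             for i in range(32):
--                 bitsg[i] += (x >> i) & 1
--     cand_u = 0
--     for i in range(32):
--         if bitsg[i] % 3 != 0:
--             cand_u |= (1 << i)
--     def to_signed(u):
--         if u >= (1 << 31):
--             return u - (1 << 32)
--         return u
--     cand = to_signed(cand_u)
--     other = to_signed(cand_u ^ xor_u)
--     cnt = sum(1 for x in nums if x == cand)
--     if cnt == 1:
--         return [cand, other]
--     else:
--         return [other, cand]
-- ===== SOURCE B (Python) =====
-- from typing import List
--
-- def onceTwice(nums: List[int]) -> List[int]:
--     # Two-register mod-3 state machine instead of 32 per-bit counters: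
--     # a bit is in `ones` iff its count so far is ≡ 1 (mod 3), in `twos` iff ≡ 2 (mod 3).
--     M = 0xFFFFFFFF
--     ones = twos = 0
--     for num in nums:
--         x = num & M
--         twos |= ones & x
--         ones ^= x
--         threes = ones & twos
--         ones &= ~threes
--         twos &= ~threes
--     xor_u = ones | twos
--     mask = xor_u & -xor_u
--     ones = twos = 0
--     for num in nums:
--         x = num & M
--         if x & mask != 0:
--             twos |= ones & x
--             ones ^= x
--             threes = ones & twos
--             ones &= ~threes
--             twos &= ~threes
--     cand_u = ones | twos
--     def to_signed(u):
--         return u - (1 << 32) if u >= (1 << 31) else u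
--     cand = to_signed(cand_u)
--     other = to_signed(cand_u ^ xor_u)
--     cnt = sum(1 for x in nums if x == cand)
--     return [cand, other] if cnt == 1 else [other, cand]
-- ===== Notes on version B (the rewrite author's own statement) =====
-- stated objective: faster
-- what changed: Replaces the 32-slot per-bit counter arrays and their 32-iteration inner loops by the classic two-register (ones/twos) mod-3 bitmask state machine updated with O(1) word operations per element in each of the two passes.
import Mathlib
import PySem

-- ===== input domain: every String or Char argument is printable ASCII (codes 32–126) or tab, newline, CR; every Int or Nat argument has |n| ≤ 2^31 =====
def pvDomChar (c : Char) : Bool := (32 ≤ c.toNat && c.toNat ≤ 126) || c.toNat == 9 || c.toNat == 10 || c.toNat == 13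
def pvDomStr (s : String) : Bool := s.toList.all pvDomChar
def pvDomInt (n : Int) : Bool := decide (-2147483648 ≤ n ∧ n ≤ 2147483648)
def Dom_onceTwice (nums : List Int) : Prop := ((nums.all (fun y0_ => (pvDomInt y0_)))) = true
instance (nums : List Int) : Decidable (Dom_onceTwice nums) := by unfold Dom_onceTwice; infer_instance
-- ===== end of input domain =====

-- B replaces A's 32-slot per-bit counter arrays (with a 32-iteration inner loop per element)
-- by the classic two-register ones/twos mod-3 bitmask state machine: objective 'faster'
-- (constant-factor: O(1) word ops per element instead of 32 counter updates).

-- ===== PORT A =====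
-- inner `for i in range(32): bits[i] += (x >> i) & 1`
def pvInnerA (x : Int) (bits : List Int) : List Int :=
  (List.range 32).foldl (fun b i => b.set i (b.getD i 0 + PySem.Int.band (x >>> i) 1)) bits

-- `for i in range(32): if bits[i] % 3 != 0: u |= (1 << i)`  (`%` on Int is exact for the positive divisor 3)
def pvXorOf (bits : List Int) : Int :=
  (List.range 32).foldl (fun a i => if bits.getD i 0 % 3 ≠ 0 then PySem.Int.bor a ((1:Int) <<< i) else a) 0

def pvToSignedA (u : Int) : Int := if 2147483648 ≤ u then u - 4294967296 else u

def onceTwice (nums : List Int) : List Int :=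
  let bits := nums.foldl (fun bits num => pvInnerA (PySem.Int.band num 4294967295) bits) (List.replicate 32 0)
  let xorU := pvXorOf bits
  let mask := PySem.Int.band xorU (-xorU)
  let bitsg := nums.foldl (fun bits num =>
      let x := PySem.Int.band num 4294967295
      if PySem.Int.band x mask ≠ 0 then pvInnerA x bits else bits) (List.replicate 32 0)
  let candU := pvXorOf bitsg
  let cand := pvToSignedA candU
  let other := pvToSignedA (PySem.Int.bxor candU xorU)
  let cnt := nums.foldl (fun acc x => if x = cand then acc + 1 else acc) (0:Int)
  if cnt = 1 then [cand, other] else [other, cand]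

-- ===== PORT B =====
-- one state-machine update: twos |= ones & x; ones ^= x; threes = ones & twos; ones &= ~threes; twos &= ~threes
def pvStepB (s : Int × Int) (x : Int) : Int × Int :=
  let twos := PySem.Int.bor s.2 (PySem.Int.band s.1 x)
  let ones := PySem.Int.bxor s.1 x
  let threes := PySem.Int.band ones twos
  (PySem.Int.band ones (~~~threes), PySem.Int.band twos (~~~threes))

def pvToSignedB (u : Int) : Int := if ((1:Int) <<< 31) ≤ u then u - ((1:Int) <<< 32) else u

def onceTwice_alt (nums : List Int) : List Int :=
  let s1 := nums.foldl (fun s num => pvStepB s (PySem.Int.band num 4294967295)) ((0:Int), (0:Int))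
  let xorU := PySem.Int.bor s1.1 s1.2
  let mask := PySem.Int.band xorU (-xorU)
  let s2 := nums.foldl (fun s num =>
      let x := PySem.Int.band num 4294967295
      if PySem.Int.band x mask ≠ 0 then pvStepB s x else s) ((0:Int), (0:Int))
  let candU := PySem.Int.bor s2.1 s2.2
  let cand := pvToSignedB candU
  let other := pvToSignedB (PySem.Int.bxor candU xorU)
  let cnt := nums.foldl (fun acc x => if x = cand then acc + 1 else acc) (0:Int)
  if cnt = 1 then [cand, other] else [other, cand]

-- ===== PRECONDITION & SPEC =====
def Spec_onceTwice (nums : List Int) (out : List Int) : Prop := out = onceTwice_alt nums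
instance (nums : List Int) (out : List Int) : Decidable (Spec_onceTwice nums out) := by unfold Spec_onceTwice; infer_instance

-- ===== CLAIM (what is proved, stated in full; the proofs are below) =====
def Claim_equal_onceTwice : Prop := ∀ (nums : List Int), Dom_onceTwice nums → Spec_onceTwice nums (onceTwice nums)

-- ===== LEMMAS AND PROOFS =====

-- bits of m &&& n form a subset of m's bits, so subtracting is the same as xor-ing it away
theorem pv_and_add_xor (m : Nat) : ∀ n : Nat, (m &&& n) + (m ^^^ (m &&& n)) = m := by
  induction m using Nat.strong_induction_on with
  | _ m ih =>
    intro n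
    rcases Nat.eq_zero_or_pos m with hm | hm
    · subst hm; simp
    · have hlt : m / 2 < m := Nat.div_lt_self hm (by norm_num)
      have ha : (m &&& n) / 2 = (m / 2) &&& (n / 2) := Nat.and_div_two
      have hx : (m ^^^ (m &&& n)) / 2 = (m / 2) ^^^ ((m &&& n) / 2) := Nat.xor_div_two
      rw [ha] at hx
      have hih := ih (m / 2) hlt (n / 2)
      have pa : ((m &&& n) % 2 = 1) ↔ (m % 2 = 1 ∧ n % 2 = 1) := by
        have h := Nat.testBit_and m n 0
        simp only [Nat.testBit_zero] at h
        constructor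
        · intro hp
          have hb : (decide (m % 2 = 1) && decide (n % 2 = 1)) = true := by
            rw [← h]; simp [hp]
          simpa using hb
        · intro hp; have : (decide ((m &&& n) % 2 = 1)) = true := by rw [h]; simp [hp.1, hp.2]
          simpa using this
      have px : ((m ^^^ (m &&& n)) % 2 = 1) ↔ ¬(m % 2 = 1 ↔ (m &&& n) % 2 = 1) := by
        have h := Nat.testBit_xor m (m &&& n) 0
        simp only [Nat.testBit_zero] at h
        by_cases h1 : m % 2 = 1 <;> by_cases h2 : (m &&& n) % 2 = 1 <;>
          simp [h1, h2] at h ⊢ <;> simpa using h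
      omega

theorem pv_not_natCast (b : Nat) : (~~~(b : Int)) = -(b : Int) - 1 := by
  have h : (~~~(b : Int)) = Int.negSucc b := rfl
  rw [h]; rw [Int.negSucc_eq]; ring

theorem pv_band_not (a b : Nat) : PySem.Int.band (a : Int) (~~~(b : Int)) = ((a ^^^ (a &&& b) : Nat) : Int) := by
  rw [pv_not_natCast]
  unfold PySem.Int.band
  have h1 : (0:Int) ≤ (a:Int) := by positivity
  have h2 : ¬ ((0:Int) ≤ -(b:Int) - 1) := by omega
  simp only [h1, h2, if_true, if_false]
  have hb : (-(-(b:Int)-1) - 1) = (b:Int) := by ring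
  rw [hb]
  simp only [Int.toNat_natCast]
  have := pv_and_add_xor a b
  congr 1
  omega

theorem pv_band_nonneg (num : Int) : 0 ≤ PySem.Int.band num 4294967295 := by
  rw [PySem.Int.band_comm]; exact PySem.Int.band_nonneg_of_nonneg_left _ (by norm_num)

theorem pv_band_lt (num : Int) : (PySem.Int.band num 4294967295).toNat < 4294967296 := by
  unfold PySem.Int.band
  split_ifs with h1 h2 h1'
  · have : num.toNat &&& (4294967295:Int).toNat ≤ (4294967295:Int).toNat := Nat.and_le_right
    simp only [Int.toNat_natCast]
    omega
  · omega
  · have : (4294967295:Int).toNat - ((4294967295:Int).toNat &&& (-num - 1).toNat) ≤ (4294967295:Int).toNat := by omega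
    simp only [Int.toNat_natCast]
    omega
  · omega

def pvXN (num : Int) : Nat := (PySem.Int.band num 4294967295).toNat
def pvBit (num : Int) (i : Nat) : Bool := (pvXN num).testBit i
def pvCnt (q : Int → Bool) (L : List Int) (i : Nat) : Nat := L.countP (fun num => q num && pvBit num i)

theorem pv_xn_eq (num : Int) : PySem.Int.band num 4294967295 = ((pvXN num : Nat) : Int) :=
  (Int.toNat_of_nonneg (pv_band_nonneg num)).symm

theorem pv_bit_high (num : Int) (i : Nat) (hi : 32 ≤ i) : pvBit num i = false := by
  apply Nat.testBit_eq_false_of_lt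
  calc pvXN num < 4294967296 := pv_band_lt num
    _ = 2 ^ 32 := by norm_num
    _ ≤ 2 ^ i := Nat.pow_le_pow_right (by norm_num) hi

theorem pv_cnt_high (q : Int → Bool) (L : List Int) (i : Nat) (hi : 32 ≤ i) : pvCnt q L i = 0 := by
  unfold pvCnt
  rw [List.countP_eq_zero]
  intro a _
  simp [pv_bit_high a i hi]

theorem pv_stepB_nat (on tn xn : Nat) :
    pvStepB ((on : Int), (tn : Int)) (xn : Int) =
      ((((on ^^^ xn) ^^^ ((on ^^^ xn) &&& ((on ^^^ xn) &&& (tn ||| (on &&& xn)))) : Nat) : Int),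
       (((tn ||| (on &&& xn)) ^^^ ((tn ||| (on &&& xn)) &&& ((on ^^^ xn) &&& (tn ||| (on &&& xn)))) : Nat) : Int)) := by
  unfold pvStepB
  simp only [PySem.Int.band_natCast, PySem.Int.bor_natCast, PySem.Int.bxor_natCast, pv_band_not]

theorem pv_step_bit (c : Nat) (o t v : Bool) (ho : o = decide (c % 3 = 1)) (ht : t = decide (c % 3 = 2)) :
    (((Bool.xor o v) && !((Bool.xor o v) && (t || (o && v)))) = decide ((c + (if v then 1 else 0)) % 3 = 1) ∧
     ((t || (o && v)) && !((Bool.xor o v) && (t || (o && v)))) = decide ((c + (if v then 1 else 0)) % 3 = 2)) := by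
  have h3 : c % 3 = 0 ∨ c % 3 = 1 ∨ c % 3 = 2 := by omega
  rcases h3 with h | h | h <;> cases v <;>
    simp [ho, ht, h, Nat.add_mod]

-- the invariant carried by one machine step
theorem pv_stepB_inv (on tn xn : Nat) (c : Nat → Nat)
    (h : ∀ i, on.testBit i = decide (c i % 3 = 1) ∧ tn.testBit i = decide (c i % 3 = 2)) :
    ∃ on' tn' : Nat, pvStepB ((on : Int), (tn : Int)) (xn : Int) = ((on' : Int), (tn' : Int)) ∧
      ∀ i, on'.testBit i = decide ((c i + (if xn.testBit i then 1 else 0)) % 3 = 1) ∧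
           tn'.testBit i = decide ((c i + (if xn.testBit i then 1 else 0)) % 3 = 2) := by
  refine ⟨_, _, pv_stepB_nat on tn xn, ?_⟩
  intro i
  have hb := pv_step_bit (c i) (on.testBit i) (tn.testBit i) (xn.testBit i) (h i).1 (h i).2
  constructor
  · simp only [Nat.testBit_xor, Nat.testBit_and, Nat.testBit_or]
    rw [← hb.1]
    cases on.testBit i <;> cases tn.testBit i <;> cases xn.testBit i <;> rfl
  · simp only [Nat.testBit_xor, Nat.testBit_and, Nat.testBit_or]
    rw [← hb.2]
    cases on.testBit i <;> cases tn.testBit i <;> cases xn.testBit i <;> rfl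

theorem pv_foldB1 (L : List Int) : ∀ (on tn : Nat) (c : Nat → Nat),
    (∀ i, on.testBit i = decide (c i % 3 = 1) ∧ tn.testBit i = decide (c i % 3 = 2)) →
    ∃ on' tn' : Nat,
      L.foldl (fun s num => pvStepB s (PySem.Int.band num 4294967295)) ((on : Int), (tn : Int)) = ((on' : Int), (tn' : Int)) ∧
      ∀ i, on'.testBit i = decide ((c i + pvCnt (fun _ => true) L i) % 3 = 1) ∧
           tn'.testBit i = decide ((c i + pvCnt (fun _ => true) L i) % 3 = 2) := by
  induction L with
  | nil =>
    intro on tn c h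
    exact ⟨on, tn, rfl, by simpa [pvCnt] using h⟩
  | cons num L ih =>
    intro on tn c h
    rw [List.foldl_cons, pv_xn_eq num]
    obtain ⟨on1, tn1, hstep, hinv⟩ := pv_stepB_inv on tn (pvXN num) c h
    rw [hstep]
    obtain ⟨on', tn', hfold, hinv'⟩ := ih on1 tn1 (fun i => c i + (if pvBit num i then 1 else 0)) (by
      intro i; exact hinv i)
    refine ⟨on', tn', hfold, ?_⟩
    intro i
    have hc : c i + pvCnt (fun _ => true) (num :: L) i
        = (c i + (if pvBit num i then 1 else 0)) + pvCnt (fun _ => true) L i := by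
      unfold pvCnt
      rw [List.countP_cons]
      by_cases hb : pvBit num i <;> simp [hb] <;> omega
    rw [hc]
    exact hinv' i

theorem pv_foldB2 (mask : Int) (L : List Int) : ∀ (on tn : Nat) (c : Nat → Nat),
    (∀ i, on.testBit i = decide (c i % 3 = 1) ∧ tn.testBit i = decide (c i % 3 = 2)) →
    ∃ on' tn' : Nat,
      L.foldl (fun s num =>
          if PySem.Int.band (PySem.Int.band num 4294967295) mask ≠ 0
          then pvStepB s (PySem.Int.band num 4294967295) else s) ((on : Int), (tn : Int)) = ((on' : Int), (tn' : Int)) ∧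
      ∀ i, on'.testBit i
            = decide ((c i + pvCnt (fun num => decide (PySem.Int.band (PySem.Int.band num 4294967295) mask ≠ 0)) L i) % 3 = 1) ∧
          tn'.testBit i
            = decide ((c i + pvCnt (fun num => decide (PySem.Int.band (PySem.Int.band num 4294967295) mask ≠ 0)) L i) % 3 = 2) := by
  induction L with
  | nil =>
    intro on tn c h
    exact ⟨on, tn, rfl, by simpa [pvCnt] using h⟩
  | cons num L ih =>
    intro on tn c h
    rw [List.foldl_cons]
    by_cases hq : PySem.Int.band (PySem.Int.band num 4294967295) mask ≠ 0
    · rw [if_pos hq, pv_xn_eq num]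
      obtain ⟨on1, tn1, hstep, hinv⟩ := pv_stepB_inv on tn (pvXN num) c h
      rw [hstep]
      obtain ⟨on', tn', hfold, hinv'⟩ := ih on1 tn1 (fun i => c i + (if pvBit num i then 1 else 0)) (by
        intro i; exact hinv i)
      refine ⟨on', tn', hfold, ?_⟩
      intro i
      have hc : c i + pvCnt (fun num => decide (PySem.Int.band (PySem.Int.band num 4294967295) mask ≠ 0)) (num :: L) i
          = (c i + (if pvBit num i then 1 else 0))
            + pvCnt (fun num => decide (PySem.Int.band (PySem.Int.band num 4294967295) mask ≠ 0)) L i := by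
        unfold pvCnt
        rw [List.countP_cons]
        by_cases hb : pvBit num i <;> simp [hb, hq] <;> omega
      rw [hc]
      exact hinv' i
    · rw [if_neg hq]
      obtain ⟨on', tn', hfold, hinv'⟩ := ih on tn c h
      refine ⟨on', tn', hfold, ?_⟩
      intro i
      have hc : pvCnt (fun num => decide (PySem.Int.band (PySem.Int.band num 4294967295) mask ≠ 0)) (num :: L) i
          = pvCnt (fun num => decide (PySem.Int.band (PySem.Int.band num 4294967295) mask ≠ 0)) L i := by
        unfold pvCnt
        rw [List.countP_cons]
        simp [hq]
      rw [hc]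
      exact hinv' i

-- ===== A-side lemmas =====

theorem pv_shift_band (xn i : Nat) :
    PySem.Int.band ((xn : Int) >>> i) 1 = (((if xn.testBit i then 1 else 0) : Nat) : Int) := by
  have h1 : ((xn : Int) >>> i) = ((xn >>> i : Nat) : Int) := rfl
  have h2 : (1 : Int) = ((1 : Nat) : Int) := rfl
  rw [h1, h2, PySem.Int.band_natCast]
  congr 1
  rw [Nat.and_one_is_mod, Nat.testBit_eq_decide_div_mod_eq, Nat.shiftRight_eq_div_pow]
  by_cases h : xn / 2 ^ i % 2 = 1 <;> simp [h] <;> omega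

theorem pv_innerA_aux (xn : Nat) (n : Nat) (hn : n ≤ 32) : ∀ (bits : List Int), bits.length = 32 →
    ((List.range n).foldl (fun b i => b.set i (b.getD i 0 + PySem.Int.band ((xn : Int) >>> i) 1)) bits).length = 32 ∧
    ∀ i, i < 32 →
      ((List.range n).foldl (fun b i => b.set i (b.getD i 0 + PySem.Int.band ((xn : Int) >>> i) 1)) bits).getD i 0
        = bits.getD i 0 + (if i < n ∧ xn.testBit i then 1 else 0) := by
  induction n with
  | zero => intro bits hb; simp [hb]
  | succ n ihn =>
    intro bits hb
    obtain ⟨hlen, hget⟩ := ihn (by omega) bits hb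
    rw [List.range_succ, List.foldl_append, List.foldl_cons, List.foldl_nil]
    set r := (List.range n).foldl (fun b i => b.set i (b.getD i 0 + PySem.Int.band ((xn : Int) >>> i) 1)) bits with hr
    constructor
    · rw [List.length_set]; exact hlen
    · intro i hi
      rw [List.getD_eq_getElem?_getD, List.getElem?_set]
      by_cases hin : n = i
      · subst hin
        simp only [hlen, hi, if_pos]
        rw [hget n hi, pv_shift_band]
        have hnn : ¬ (n < n) := by omega
        simp only [hnn, false_and, if_false, add_zero]
        by_cases ht : xn.testBit n <;> simp [ht]
      · rw [if_neg hin, ← List.getD_eq_getElem?_getD]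
        rw [hget i hi]
        have : (i < n + 1 ∧ xn.testBit i) ↔ (i < n ∧ xn.testBit i) := by
          constructor
          · rintro ⟨h1, h2⟩; exact ⟨by omega, h2⟩
          · rintro ⟨h1, h2⟩; exact ⟨by omega, h2⟩
        rw [if_congr this rfl rfl]

theorem pv_innerA_char (xn : Nat) (bits : List Int) (hb : bits.length = 32) :
    (pvInnerA (xn : Int) bits).length = 32 ∧
    ∀ i, i < 32 → (pvInnerA (xn : Int) bits).getD i 0 = bits.getD i 0 + (if xn.testBit i then 1 else 0) := by
  obtain ⟨h1, h2⟩ := pv_innerA_aux xn 32 (by omega) bits hb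
  constructor
  · exact h1
  · intro i hi
    have h := h2 i hi
    have hiff : (i < 32 ∧ xn.testBit i = true) ↔ (xn.testBit i = true) := ⟨fun h => h.2, fun h => ⟨hi, h⟩⟩
    rw [if_congr hiff rfl rfl] at h
    exact h

theorem pv_foldA1 (L : List Int) : ∀ (bits : List Int) (c : Nat → Nat), bits.length = 32 →
    (∀ i, i < 32 → bits.getD i 0 = ((c i : Nat) : Int)) →
    (L.foldl (fun bits num => pvInnerA (PySem.Int.band num 4294967295) bits) bits).length = 32 ∧
    ∀ i, i < 32 → (L.foldl (fun bits num => pvInnerA (PySem.Int.band num 4294967295) bits) bits).getD i 0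
        = (((c i + pvCnt (fun _ => true) L i : Nat)) : Int) := by
  induction L with
  | nil =>
    intro bits c hb hc
    refine ⟨hb, ?_⟩
    intro i hi
    simpa [pvCnt] using hc i hi
  | cons num L ih =>
    intro bits c hb hc
    rw [List.foldl_cons, pv_xn_eq num]
    obtain ⟨h1, h2⟩ := pv_innerA_char (pvXN num) bits hb
    obtain ⟨h1', h2'⟩ := ih (pvInnerA ((pvXN num : Nat) : Int) bits) (fun i => c i + (if pvBit num i then 1 else 0)) h1 (by
      intro i hi
      rw [h2 i hi, hc i hi]
      unfold pvBit
      by_cases ht : (pvXN num).testBit i <;> simp [ht])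
    refine ⟨h1', ?_⟩
    intro i hi
    have hc2 : c i + pvCnt (fun _ => true) (num :: L) i
        = (c i + (if pvBit num i then 1 else 0)) + pvCnt (fun _ => true) L i := by
      unfold pvCnt
      rw [List.countP_cons]
      by_cases hbt : pvBit num i <;> simp [hbt] <;> omega
    rw [hc2]
    exact h2' i hi

theorem pv_foldA2 (mask : Int) (L : List Int) : ∀ (bits : List Int) (c : Nat → Nat), bits.length = 32 →
    (∀ i, i < 32 → bits.getD i 0 = ((c i : Nat) : Int)) →
    (L.foldl (fun bits num =>
        if PySem.Int.band (PySem.Int.band num 4294967295) mask ≠ 0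
        then pvInnerA (PySem.Int.band num 4294967295) bits else bits) bits).length = 32 ∧
    ∀ i, i < 32 → (L.foldl (fun bits num =>
        if PySem.Int.band (PySem.Int.band num 4294967295) mask ≠ 0
        then pvInnerA (PySem.Int.band num 4294967295) bits else bits) bits).getD i 0
        = (((c i + pvCnt (fun num => decide (PySem.Int.band (PySem.Int.band num 4294967295) mask ≠ 0)) L i : Nat)) : Int) := by
  induction L with
  | nil =>
    intro bits c hb hc
    refine ⟨hb, ?_⟩
    intro i hi
    simpa [pvCnt] using hc i hi
  | cons num L ih =>
    intro bits c hb hc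
    rw [List.foldl_cons]
    by_cases hq : PySem.Int.band (PySem.Int.band num 4294967295) mask ≠ 0
    · rw [if_pos hq, pv_xn_eq num]
      obtain ⟨h1, h2⟩ := pv_innerA_char (pvXN num) bits hb
      obtain ⟨h1', h2'⟩ := ih (pvInnerA ((pvXN num : Nat) : Int) bits) (fun i => c i + (if pvBit num i then 1 else 0)) h1 (by
        intro i hi
        rw [h2 i hi, hc i hi]
        unfold pvBit
        push_cast
        by_cases ht : (pvXN num).testBit i <;> simp [ht])
      refine ⟨h1', ?_⟩
      intro i hi
      have hc2 : c i + pvCnt (fun num => decide (PySem.Int.band (PySem.Int.band num 4294967295) mask ≠ 0)) (num :: L) i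
          = (c i + (if pvBit num i then 1 else 0))
            + pvCnt (fun num => decide (PySem.Int.band (PySem.Int.band num 4294967295) mask ≠ 0)) L i := by
        unfold pvCnt
        rw [List.countP_cons]
        by_cases hbt : pvBit num i <;> simp [hbt, hq] <;> omega
      rw [hc2]
      exact h2' i hi
    · rw [if_neg hq]
      obtain ⟨h1', h2'⟩ := ih bits c hb hc
      refine ⟨h1', ?_⟩
      intro i hi
      have hc2 : pvCnt (fun num => decide (PySem.Int.band (PySem.Int.band num 4294967295) mask ≠ 0)) (num :: L) i
          = pvCnt (fun num => decide (PySem.Int.band (PySem.Int.band num 4294967295) mask ≠ 0)) L i := by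
        unfold pvCnt
        rw [List.countP_cons]
        simp [hq]
      rw [hc2]
      exact h2' i hi

theorem pv_xorOf_aux (bits : List Int) (c : Nat → Nat)
    (h : ∀ i, i < 32 → bits.getD i 0 = ((c i : Nat) : Int)) (n : Nat) (hn : n ≤ 32) :
    ∃ u : Nat,
      ((List.range n).foldl (fun a i => if bits.getD i 0 % 3 ≠ 0 then PySem.Int.bor a ((1:Int) <<< i) else a) 0 = ((u : Nat) : Int)) ∧
      ∀ j, u.testBit j = (decide (j < n) && decide (c j % 3 ≠ 0)) := by
  induction n with
  | zero => exact ⟨0, rfl, by simp⟩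
  | succ n ihn =>
    obtain ⟨u, hu, hbit⟩ := ihn (by omega)
    rw [List.range_succ, List.foldl_append, List.foldl_cons, List.foldl_nil, hu]
    have hcond : (bits.getD n 0 % 3 ≠ 0) ↔ (c n % 3 ≠ 0) := by
      rw [h n (by omega)]
      constructor
      · intro hne hmod; apply hne; push_cast; omega
      · intro hne hmod; apply hne
        have : ((c n : Nat) : Int) % 3 = ((c n % 3 : Nat) : Int) := by push_cast; omega
        omega
    by_cases hc : c n % 3 ≠ 0
    · rw [if_pos (hcond.mpr hc)]
      have hsh : ((1:Int) <<< n) = ((2 ^ n : Nat) : Int) := by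
        have : ((1:Int) <<< n) = ((1 <<< n : Nat) : Int) := rfl
        rw [this, Nat.one_shiftLeft]
      rw [hsh, PySem.Int.bor_natCast]
      refine ⟨u ||| 2 ^ n, rfl, ?_⟩
      intro j
      rw [Nat.testBit_or, hbit j, Nat.testBit_two_pow]
      by_cases hj : j < n
      · have h1 : j < n + 1 := by omega
        have h2 : ¬ (n = j) := by omega
        simp [hj, h1, h2]
      · by_cases hj2 : j = n
        · subst hj2
          simp [hc]
        · have h1 : ¬ (j < n + 1) := by omega
          have h2 : ¬ (n = j) := by omega
          simp [hj, h1, h2]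
    · rw [if_neg (fun hx => hc (hcond.mp hx))]
      refine ⟨u, rfl, ?_⟩
      intro j
      rw [hbit j]
      by_cases hj : j < n
      · have : j < n + 1 := by omega
        simp [hj, this]
      · by_cases hj2 : j = n
        · subst hj2
          have h1 : ¬ (j < j) := by omega
          have h2 : j < j + 1 := by omega
          simp only [h1, h2, decide_true, decide_false, Bool.false_and, Bool.true_and]
          simp [hc]
        · have : ¬ (j < n + 1) := by omega
          simp [hj, this]

theorem pv_xorOf_char (bits : List Int) (c : Nat → Nat)
    (h : ∀ i, i < 32 → bits.getD i 0 = ((c i : Nat) : Int)) :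
    ∃ u : Nat, pvXorOf bits = ((u : Nat) : Int) ∧
      ∀ j, u.testBit j = (decide (j < 32) && decide (c j % 3 ≠ 0)) :=
  pv_xorOf_aux bits c h 32 (by omega)

-- counts of the two sides coincide, so the two 32-bit summaries are the same natural number
theorem pv_u_eq (uA on tn : Nat) (cnt : Nat → Nat)
    (hcnt : ∀ j, 32 ≤ j → cnt j = 0)
    (hA : ∀ j, uA.testBit j = (decide (j < 32) && decide (cnt j % 3 ≠ 0)))
    (hon : ∀ j, on.testBit j = decide (cnt j % 3 = 1))
    (htn : ∀ j, tn.testBit j = decide (cnt j % 3 = 2)) :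
    uA = on ||| tn := by
  apply Nat.eq_of_testBit_eq
  intro j
  rw [Nat.testBit_or, hA j, hon j, htn j]
  by_cases hj : j < 32
  · simp only [hj, decide_true, Bool.true_and]
    have h3 : cnt j % 3 = 0 ∨ cnt j % 3 = 1 ∨ cnt j % 3 = 2 := by omega
    rcases h3 with h | h | h <;> simp [h]
  · have h0 : cnt j = 0 := hcnt j (by omega)
    simp [hj, h0]

theorem pv_toSigned_eq (u : Int) : pvToSignedB u = pvToSignedA u := by
  unfold pvToSignedA pvToSignedB
  have h1 : (1:Int) <<< 31 = 2147483648 := by decide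
  have h2 : (1:Int) <<< 32 = 4294967296 := by decide
  rw [h1, h2]

-- zero state satisfies the zero-count invariant
theorem pv_zero_inv : ∀ i, (0 : Nat).testBit i = decide ((fun _ : Nat => 0) i % 3 = 1) ∧
    (0 : Nat).testBit i = decide ((fun _ : Nat => 0) i % 3 = 2) := by
  intro i; simp

theorem pv_replicate_char : ∀ i, i < 32 → (List.replicate 32 (0:Int)).getD i 0 = (((0:Nat) : Nat) : Int) := by
  intro i hi
  rw [List.getD_eq_getElem?_getD, List.getElem?_replicate, if_pos hi]
  rfl

theorem pv_main (nums : List Int) : onceTwice nums = onceTwice_alt nums := by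
  unfold onceTwice onceTwice_alt
  simp only []
  -- first pass, A side
  obtain ⟨hlenA, hgetA⟩ := pv_foldA1 nums (List.replicate 32 0) (fun _ => 0) (by simp) pv_replicate_char
  obtain ⟨uA, huA, hbitA⟩ := pv_xorOf_char _ (fun i => 0 + pvCnt (fun _ => true) nums i) hgetA
  -- first pass, B side
  obtain ⟨on, tn, hfoldB, hinvB⟩ := pv_foldB1 nums 0 0 (fun _ => 0) pv_zero_inv
  have hU : uA = on ||| tn := by
    apply pv_u_eq uA on tn (fun i => 0 + pvCnt (fun _ => true) nums i)
    · intro j hj; simp [pv_cnt_high _ _ _ hj]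
    · exact hbitA
    · intro j; exact (hinvB j).1
    · intro j; exact (hinvB j).2
  simp only [Nat.cast_zero] at hfoldB
  rw [huA, hfoldB]
  simp only []
  have hbor : PySem.Int.bor ((on : Nat) : Int) ((tn : Nat) : Int) = (((on ||| tn : Nat)) : Int) := PySem.Int.bor_natCast on tn
  rw [hbor, hU]
  -- second pass: same mask on both sides now
  set mask := PySem.Int.band (((on ||| tn : Nat)) : Int) (-(((on ||| tn : Nat)) : Int)) with hmask
  obtain ⟨hlenA2, hgetA2⟩ := pv_foldA2 mask nums (List.replicate 32 0) (fun _ => 0) (by simp) pv_replicate_char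
  obtain ⟨uA2, huA2, hbitA2⟩ := pv_xorOf_char _
    (fun i => 0 + pvCnt (fun num => decide (PySem.Int.band (PySem.Int.band num 4294967295) mask ≠ 0)) nums i) hgetA2
  obtain ⟨on2, tn2, hfoldB2, hinvB2⟩ := pv_foldB2 mask nums 0 0 (fun _ => 0) pv_zero_inv
  have hU2 : uA2 = on2 ||| tn2 := by
    apply pv_u_eq uA2 on2 tn2 (fun i => 0 + pvCnt (fun num => decide (PySem.Int.band (PySem.Int.band num 4294967295) mask ≠ 0)) nums i)
    · intro j hj; simp [pv_cnt_high _ _ _ hj]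
    · exact hbitA2
    · intro j; exact (hinvB2 j).1
    · intro j; exact (hinvB2 j).2
  simp only [Nat.cast_zero] at hfoldB2
  rw [huA2, hfoldB2]
  simp only []
  have hbor2 : PySem.Int.bor ((on2 : Nat) : Int) ((tn2 : Nat) : Int) = (((on2 ||| tn2 : Nat)) : Int) := PySem.Int.bor_natCast on2 tn2
  rw [hbor2, hU2]
  simp only [pv_toSigned_eq]

-- ===== VERDICT (by name: the statement is the Claim_ definition above) =====
theorem onceTwice_spec : Claim_equal_onceTwice := by
  intro nums _hdom
  unfold Spec_onceTwice
  exact pv_main nums
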